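-- pv_equiv track=rewrite | github.com/wfrl/misc | music/enhtrans.py | _build_reverse_map
-- ===== SOURCE A (Python) =====
-- def _build_reverse_map(lang):
--     """
--     Builds a lookup for formatting: (BaseIndex, Accidental) -> String
--     Used for Output.
--     """
--     rev_map = {}
--     # We can reuse the logic of build_note_map but inverted.
--     # However, we must ensure 1:1 mapping for canonical output.
--
--     # Priority logic:
--     # In German, (6, -1) MUST be "b", not "hes".
--     # In German, (2, -1) MUST be "es", not "ees".
--
--     # Let's define canonical names explicitly.
--     bases = [0, 1, 2, 3, 4, 5, 6]
--
--     for idx in bases: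
--         for acc in range(-2, 3): # -2 to +2
--             name = ""
--             # default calc
--             std_chars = ['c', 'd', 'e', 'f', 'g', 'a', 'b']
--             base_char = std_chars[idx]
--
--             if lang == 'en':
--                 # English is regular-ish
--                 suffix = ""
--                 if acc == 0: suffix = ""
--                 elif acc == 1: suffix = "is"
--                 elif acc == 2: suffix = "isis"
--                 elif acc == -1: suffix = "es" # standard lilypond english is 'es' suffix, but...
--                 elif acc == -2: suffix = "eses"
--
--                 # Fix vowels for standard english notation (ees, aes)
--                 if base_char == 'e' and acc < 0:
--                      name = 'e' + suffix # ees
--                 elif base_char == 'a' and acc < 0: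
--                      name = 'a' + suffix # aes
--                 else:
--                     name = base_char + suffix
--
--             elif lang == 'de':
--                 # German Logic
--                 if idx == 6: # H / B
--                     if acc == 0: name = "h"
--                     elif acc == 1: name = "his"
--                     elif acc == 2: name = "hisis"
--                     elif acc == -1: name = "b"     # Exception
--                     elif acc == -2: name = "heses" # Exception (or beses? heses is standard)
--
--                 elif idx == 2: # E
--                     if acc == -1: name = "es"
--                     elif acc == -2: name = "eses"
--                     else: name = "e" + ("is"*acc) if acc>0 else "e" # logic handled below
--
--                 elif idx == 5: # A
--                     if acc == -1: name = "as"
--                     elif acc == -2: name = "ases"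
--                     else: name = "a" + ("is"*acc) if acc>0 else "a"
--
--                 else: # c, d, f, g
--                     name = base_char
--                     if acc > 0: name += "is" * acc
--                     elif acc < 0: name += "es" * abs(acc)
--
--                 # Fallback for E/A positives
--                 if name == "":
--                     base_c = "h" if (idx==6) else std_chars[idx]
--                     if acc > 0: name = base_c + "is" * acc
--                     elif acc == 0: name = base_c
--
--             rev_map[(idx, acc)] = name
--
--     return rev_map
-- ===== SOURCE B (Python) =====
-- _EN = {
--     (0, -2): 'ceses',
--     (0, -1): 'ces',
--     (0, 0): 'c',
--     (0, 1): 'cis',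
--     (0, 2): 'cisis',
--     (1, -2): 'deses',
--     (1, -1): 'des',
--     (1, 0): 'd',
--     (1, 1): 'dis',
--     (1, 2): 'disis',
--     (2, -2): 'eeses',
--     (2, -1): 'ees',
--     (2, 0): 'e',
--     (2, 1): 'eis',
--     (2, 2): 'eisis',
--     (3, -2): 'feses',
--     (3, -1): 'fes',
--     (3, 0): 'f',
--     (3, 1): 'fis',
--     (3, 2): 'fisis',
--     (4, -2): 'geses',
--     (4, -1): 'ges',
--     (4, 0): 'g',
--     (4, 1): 'gis',
--     (4, 2): 'gisis',
--     (5, -2): 'aeses',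
--     (5, -1): 'aes',
--     (5, 0): 'a',
--     (5, 1): 'ais',
--     (5, 2): 'aisis',
--     (6, -2): 'beses',
--     (6, -1): 'bes',
--     (6, 0): 'b',
--     (6, 1): 'bis',
--     (6, 2): 'bisis',
-- }
--
-- _DE = {
--     (0, -2): 'ceses',
--     (0, -1): 'ces',
--     (0, 0): 'c',
--     (0, 1): 'cis',
--     (0, 2): 'cisis',
--     (1, -2): 'deses',
--     (1, -1): 'des',
--     (1, 0): 'd',
--     (1, 1): 'dis',
--     (1, 2): 'disis',
--     (2, -2): 'eses',
--     (2, -1): 'es',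
--     (2, 0): 'e',
--     (2, 1): 'eis',
--     (2, 2): 'eisis',
--     (3, -2): 'feses',
--     (3, -1): 'fes',
--     (3, 0): 'f',
--     (3, 1): 'fis',
--     (3, 2): 'fisis',
--     (4, -2): 'geses',
--     (4, -1): 'ges',
--     (4, 0): 'g',
--     (4, 1): 'gis',
--     (4, 2): 'gisis',
--     (5, -2): 'ases',
--     (5, -1): 'as',
--     (5, 0): 'a',
--     (5, 1): 'ais',
--     (5, 2): 'aisis',
--     (6, -2): 'heses',
--     (6, -1): 'b',
--     (6, 0): 'h',
--     (6, 1): 'his',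
--     (6, 2): 'hisis',
-- }
--
-- def _build_reverse_map(lang):
--     """Hardcoded (BaseIndex, Accidental) -> name tables; no loops over bases/accidentals."""
--     if lang == 'en':
--         return dict(_EN)
--     if lang == 'de':
--         return dict(_DE)
--     return {k: "" for k in _EN}
-- ===== Notes on version B (the rewrite author's own statement) =====
-- stated objective: simpler
-- what changed: Replaces A's nested loops over bases/accidentals with per-language branching and string arithmetic by a single branch on lang returning precomputed literal tables (en, de, and an all-empty table for other languages).
import Mathlib
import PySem

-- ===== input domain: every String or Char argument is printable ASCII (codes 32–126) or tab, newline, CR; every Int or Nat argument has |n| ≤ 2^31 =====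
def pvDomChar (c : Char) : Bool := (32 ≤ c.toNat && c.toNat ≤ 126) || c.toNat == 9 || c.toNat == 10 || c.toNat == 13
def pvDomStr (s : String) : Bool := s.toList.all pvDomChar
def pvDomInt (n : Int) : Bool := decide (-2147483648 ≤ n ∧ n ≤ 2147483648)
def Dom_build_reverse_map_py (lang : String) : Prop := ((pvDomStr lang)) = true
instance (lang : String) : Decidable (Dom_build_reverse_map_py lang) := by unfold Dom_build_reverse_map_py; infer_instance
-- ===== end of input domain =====

-- B replaces A's nested loops and per-entry branch logic by three precomputed literal tables
-- selected by a single branch on lang (objective: simpler).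

-- ===== PORT A =====

-- Python 's * n' for n possibly ≤ 0 (exact: negative repetition gives "").
def pvStrMul (s : String) (n : Int) : String := String.join (List.replicate n.toNat s)

def pvNameEn (base_char : String) (acc : Int) : String :=
  let suffix : String :=
    if acc = 0 then "" else if acc = 1 then "is" else if acc = 2 then "isis"
    else if acc = -1 then "es" else if acc = -2 then "eses" else ""
  if base_char = "e" ∧ acc < 0 then "e" ++ suffix
  else if base_char = "a" ∧ acc < 0 then "a" ++ suffix
  else base_char ++ suffix

def pvNameDe (idx : Int) (base_char : String) (acc : Int) : String :=
  let name : String :=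
    if idx = 6 then
      (if acc = 0 then "h" else if acc = 1 then "his" else if acc = 2 then "hisis"
       else if acc = -1 then "b" else if acc = -2 then "heses" else "")
    else if idx = 2 then
      -- Python precedence: name = ("e" + "is"*acc) if acc>0 else "e"
      (if acc = -1 then "es" else if acc = -2 then "eses"
       else if acc > 0 then "e" ++ pvStrMul "is" acc else "e")
    else if idx = 5 then
      (if acc = -1 then "as" else if acc = -2 then "ases"
       else if acc > 0 then "a" ++ pvStrMul "is" acc else "a")
    else
      (if acc > 0 then base_char ++ pvStrMul "is" acc
       else if acc < 0 then base_char ++ pvStrMul "es" |acc| else base_char)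
  if name = "" then
    let base_c : String := if idx = 6 then "h" else base_char
    if acc > 0 then base_c ++ pvStrMul "is" acc else if acc = 0 then base_c else ""
  else name

-- rev_map's keys (idx, acc) are all fresh, so dict insertion in order = append.
def build_reverse_map_py (lang : String) : List (Int × Int × String) :=
  let bases : List Int := [0, 1, 2, 3, 4, 5, 6]
  bases.foldl (fun rev idx =>
    (PySem.List.pyRange (-2) 3 1).foldl (fun rev acc =>
      let std_chars : List String := ["c", "d", "e", "f", "g", "a", "b"]
      let base_char := (PySem.List.pyGet? std_chars idx).getD ""  -- exact: idx ∈ 0..6 here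
      let name : String :=
        if lang = "en" then pvNameEn base_char acc
        else if lang = "de" then pvNameDe idx base_char acc
        else ""
      rev ++ [(idx, acc, name)]) rev) []

-- ===== PORT B =====

def pvEnTable : List (Int × Int × String) :=
  [(0, -2, "ceses"), (0, -1, "ces"), (0, 0, "c"), (0, 1, "cis"), (0, 2, "cisis"),
   (1, -2, "deses"), (1, -1, "des"), (1, 0, "d"), (1, 1, "dis"), (1, 2, "disis"),
   (2, -2, "eeses"), (2, -1, "ees"), (2, 0, "e"), (2, 1, "eis"), (2, 2, "eisis"),
   (3, -2, "feses"), (3, -1, "fes"), (3, 0, "f"), (3, 1, "fis"), (3, 2, "fisis"),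
   (4, -2, "geses"), (4, -1, "ges"), (4, 0, "g"), (4, 1, "gis"), (4, 2, "gisis"),
   (5, -2, "aeses"), (5, -1, "aes"), (5, 0, "a"), (5, 1, "ais"), (5, 2, "aisis"),
   (6, -2, "beses"), (6, -1, "bes"), (6, 0, "b"), (6, 1, "bis"), (6, 2, "bisis")]

def pvDeTable : List (Int × Int × String) :=
  [(0, -2, "ceses"), (0, -1, "ces"), (0, 0, "c"), (0, 1, "cis"), (0, 2, "cisis"),
   (1, -2, "deses"), (1, -1, "des"), (1, 0, "d"), (1, 1, "dis"), (1, 2, "disis"),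
   (2, -2, "eses"), (2, -1, "es"), (2, 0, "e"), (2, 1, "eis"), (2, 2, "eisis"),
   (3, -2, "feses"), (3, -1, "fes"), (3, 0, "f"), (3, 1, "fis"), (3, 2, "fisis"),
   (4, -2, "geses"), (4, -1, "ges"), (4, 0, "g"), (4, 1, "gis"), (4, 2, "gisis"),
   (5, -2, "ases"), (5, -1, "as"), (5, 0, "a"), (5, 1, "ais"), (5, 2, "aisis"),
   (6, -2, "heses"), (6, -1, "b"), (6, 0, "h"), (6, 1, "his"), (6, 2, "hisis")]

def build_reverse_map_py_alt (lang : String) : List (Int × Int × String) :=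
  if lang = "en" then pvEnTable
  else if lang = "de" then pvDeTable
  else pvEnTable.map (fun e => (e.1, e.2.1, ""))

-- ===== PRECONDITION & SPEC =====
def Spec_build_reverse_map_py (lang : String) (out : List (Int × Int × String)) : Prop := out = build_reverse_map_py_alt lang
instance (lang : String) (out : List (Int × Int × String)) : Decidable (Spec_build_reverse_map_py lang out) := by unfold Spec_build_reverse_map_py; infer_instance

-- ===== CLAIM (what is proved, stated in full; the proofs are below) =====
def Claim_equal_build_reverse_map_py : Prop := ∀ (lang : String), Dom_build_reverse_map_py lang → Spec_build_reverse_map_py lang (build_reverse_map_py lang)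

-- ===== LEMMAS AND PROOFS =====

theorem pvRange_eval : PySem.List.pyRange (-2) 3 1 = [-2, -1, 0, 1, 2] := by decide

theorem pv_other (lang : String) (h1 : lang ≠ "en") (h2 : lang ≠ "de") :
    build_reverse_map_py lang = build_reverse_map_py_alt lang := by
  simp [build_reverse_map_py, build_reverse_map_py_alt, pvRange_eval, h1, h2, pvEnTable]

-- ===== VERDICT (by name: the statement is the Claim_ definition above) =====
theorem build_reverse_map_py_spec : Claim_equal_build_reverse_map_py := by
  intro lang _
  unfold Spec_build_reverse_map_py
  by_cases h1 : lang = "en"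
  · subst h1; decide
  · by_cases h2 : lang = "de"
    · subst h2; decide
    · exact pv_other lang h1 h2
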